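-- pv_equiv track=rewrite | github.com/pypi-data/pypi-mirror-309 | packages/creaocode/creaocode-0.2.0.tar.gz/creaocode-0.2.0/creao/core/component/dedupe_component.py | convert_to_dict_of_lists
-- ===== SOURCE A (Python) =====
-- from collections import defaultdict
-- from typing import Dict, List
--
-- def convert_to_dict_of_lists(
--     data: List[Dict[str, str]]
-- ) -> Dict[str, List[str]]:
--     result = defaultdict(list)
--
--     for entry in data:
--         for key, value in entry.items():
--             result[key].append(value)
--     return result
-- ===== SOURCE B (Python) =====
-- from collections import defaultdict
-- from typing import Dict, List
--
-- def convert_to_dict_of_lists(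
--     data: List[Dict[str, str]]
-- ) -> Dict[str, List[str]]:
--     # column-wise (transposed) build: collect the ordered set of keys first,
--     # then gather each key's column in one comprehension per key
--     all_keys = dict.fromkeys(k for entry in data for k in entry)
--     result = defaultdict(list)
--     for key in all_keys:
--         result[key] = [entry[key] for entry in data if key in entry]
--     return result
-- ===== Notes on version B (the rewrite author's own statement) =====
-- stated objective: alternative
-- what changed: B builds the dict column-wise: it first collects the ordered set of keys across all entries (dict.fromkeys over the flattened keys) and then gathers each key's value column in a single comprehension per key, instead of A's row-wise nested loop that appends into a defaultdict; Pre_ only excludes association lists in which an entry repeats a key, which cannot represent a Python dict input.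
import Mathlib
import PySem

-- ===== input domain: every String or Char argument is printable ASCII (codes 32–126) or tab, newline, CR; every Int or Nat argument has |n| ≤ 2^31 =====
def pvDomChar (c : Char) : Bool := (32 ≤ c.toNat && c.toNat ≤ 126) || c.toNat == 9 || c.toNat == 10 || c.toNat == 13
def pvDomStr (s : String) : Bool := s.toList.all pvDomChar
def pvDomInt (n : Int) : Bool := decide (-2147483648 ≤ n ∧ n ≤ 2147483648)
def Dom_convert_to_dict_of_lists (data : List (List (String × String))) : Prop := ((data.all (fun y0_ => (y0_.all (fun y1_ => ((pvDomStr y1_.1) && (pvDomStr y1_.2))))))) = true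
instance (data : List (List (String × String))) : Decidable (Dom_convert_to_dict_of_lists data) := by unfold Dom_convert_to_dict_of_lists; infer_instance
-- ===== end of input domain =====

-- B builds the result column-wise (ordered key set first, then one gathered column per key)
-- instead of A's row-wise nested append loop; objective: alternative decomposition, same cost.

-- ===== PORT A =====
def convert_to_dict_of_lists (data : List (List (String × String))) : List (String × List String) :=
  let result : PySem.Dict String (List String) :=
    data.foldl (fun result entry =>
      entry.foldl (fun r kv => r.modify kv.1 [] (fun l => l ++ [kv.2])) result)
      PySem.Dict.empty
  result.items

-- ===== PORT B =====
def convert_to_dict_of_lists_alt (data : List (List (String × String))) : List (String × List String) :=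
  let allKeys := PySem.List.dedup (data.flatMap (fun entry => entry.map (·.1)))
  allKeys.map (fun key => (key, data.filterMap (fun entry => entry.lookup key)))

-- ===== PRECONDITION & SPEC =====
-- Pre_ excludes only association lists in which some entry repeats a key: such lists do not
-- represent values of A's parameter type List[Dict[str, str]] (a Python dict cannot hold
-- duplicate keys), so no Python input is excluded.
def Pre_convert_to_dict_of_lists (data : List (List (String × String))) : Prop :=
  ∀ entry ∈ data, (entry.map Prod.fst).Nodup
instance (data : List (List (String × String))) : Decidable (Pre_convert_to_dict_of_lists data) := by
  unfold Pre_convert_to_dict_of_lists; infer_instance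

def pvWitness_convert_to_dict_of_lists : (List (List (String × String))) :=
  [[("a", "1"), ("b", "2")], [("a", "3")]]

def Spec_convert_to_dict_of_lists (data : List (List (String × String))) (out : List (String × List String)) : Prop := out = convert_to_dict_of_lists_alt data
instance (data : List (List (String × String))) (out : List (String × List String)) : Decidable (Spec_convert_to_dict_of_lists data out) := by unfold Spec_convert_to_dict_of_lists; infer_instance

-- ===== CLAIM (what is proved, stated in full; the proofs are below) =====
def Claim_equal_convert_to_dict_of_lists : Prop := ∀ (data : List (List (String × String))), Dom_convert_to_dict_of_lists data → Pre_convert_to_dict_of_lists data → Spec_convert_to_dict_of_lists data (convert_to_dict_of_lists data)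

-- ===== LEMMAS AND PROOFS =====

-- In an entry with distinct keys, the list of values at key k is exactly the (≤1-element)
-- lookup result.
theorem filter_map_eq_lookup (k : String) (e : List (String × String))
    (h : (e.map Prod.fst).Nodup) :
    (e.filter (fun p => p.1 == k)).map (·.2)
      = ((e.lookup k).map (fun v => [v])).getD [] := by
  induction e with
  | nil => simp [List.lookup]
  | cons p rest ih =>
    simp only [List.map_cons, List.nodup_cons] at h
    by_cases hk : p.1 = k
    · subst hk
      have hnil : rest.filter (fun q => q.1 == p.1) = [] := by
        refine List.filter_eq_nil_iff.mpr ?_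
        intro q hq hq1
        have hmem : p.1 ∈ rest.map Prod.fst := List.mem_map.mpr ⟨q, hq, by simpa using hq1⟩
        exact absurd hmem h.1
      simp [List.lookup, hnil]
    · have hk' : (k == p.1) = false := by simp; exact fun e => hk e.symm
      have hk'' : (p.1 == k) = false := by simp [hk]
      simp [List.lookup, hk', hk'', ih h.2]

-- The per-key column of the flattened data equals B's per-key filterMap over the entries.
theorem column_eq (data : List (List (String × String)))
    (h : ∀ entry ∈ data, (entry.map Prod.fst).Nodup) (k : String) :
    (data.flatten.filter (fun p => p.1 == k)).map (·.2)
      = data.filterMap (fun entry => entry.lookup k) := by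
  induction data with
  | nil => simp
  | cons e rest ih =>
    have he := h e (by simp)
    have hrest : ∀ entry ∈ rest, (entry.map Prod.fst).Nodup := fun x hx => h x (by simp [hx])
    simp only [List.flatten_cons, List.filter_append, List.map_append, List.filterMap_cons,
      ih hrest, filter_map_eq_lookup k e he]
    cases e.lookup k <;> simp

theorem convert_to_dict_of_lists_eq (data : List (List (String × String)))
    (h : ∀ entry ∈ data, (entry.map Prod.fst).Nodup) :
    convert_to_dict_of_lists data = convert_to_dict_of_lists_alt data := by
  unfold convert_to_dict_of_lists convert_to_dict_of_lists_alt
  rw [show (data.foldl (fun result entry =>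
        entry.foldl (fun r kv => r.modify kv.1 [] (fun l => l ++ [kv.2])) result)
        PySem.Dict.empty)
      = data.flatten.foldl (fun r kv => r.modify kv.1 [] (fun l => l ++ [kv.2]))
        PySem.Dict.empty from (List.foldl_flatten).symm]
  set D := data.flatten.foldl (fun r kv => r.modify kv.1 [] (fun l => l ++ [kv.2]))
    PySem.Dict.empty with hD
  have hkeys : D.keys = PySem.List.dedup (data.flatMap (fun entry => entry.map (·.1))) := by
    rw [hD, PySem.Dict.keys_foldl_modify_key data.flatten Prod.fst [] _ PySem.Dict.empty]
    simp [PySem.Set.update_nil_left, List.flatMap_def, ← List.map_flatten]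
  have hnodup : D.keys.Nodup := by
    rw [hkeys]; exact PySem.List.nodup_dedup _
  rw [PySem.Dict.items_eq_map_keys D hnodup [], hkeys]
  refine List.map_congr_left ?_
  intro k _
  have hg := PySem.Dict.getD_foldl_modify_append data.flatten PySem.Dict.empty k
  rw [hD, hg, PySem.Dict.getD_empty, List.nil_append, column_eq data h k]

-- ===== VERDICT (by name: the statement is the Claim_ definition above) =====
theorem convert_to_dict_of_lists_spec : Claim_equal_convert_to_dict_of_lists := by
  intro data _ hpre
  exact convert_to_dict_of_lists_eq data hpre
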